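-- pv_equiv track=rewrite | github.com/nmiwasaki/Advent-of-Code | 2015/Day 5/5-2.py | letters_pairs
-- ===== SOURCE A (Python) =====
-- def letters_pairs(word: str):
--     # extract all two char substrings
--     substrings = list()
--     for i in range(0, len(word) - 1):
--         substrings.append(word[i:i + 2])
--
--     for i in range(0, len(substrings) - 2):
--         for j in range(i + 2, len(substrings)):
--             if substrings[i] == substrings[j]:
--                 return True
--     return False
-- ===== SOURCE B (Python) =====
-- def letters_pairs(word: str):
--     # single pass: remember the earliest index of each two-char pair; a later
--     # occurrence at distance >= 2 is a non-overlapping repeat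
--     first = {}
--     for i in range(len(word) - 1):
--         pair = word[i:i + 2]
--         if pair in first:
--             if i - first[pair] >= 2:
--                 return True
--         else:
--             first[pair] = i
--     return False
-- ===== Notes on version B (the rewrite author's own statement) =====
-- stated objective: faster
-- what changed: replaced the nested quadratic scan over all index pairs by a single pass that stores the earliest index of each two-char substring in a dict and fires when a later occurrence is at distance >= 2
import Mathlib
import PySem

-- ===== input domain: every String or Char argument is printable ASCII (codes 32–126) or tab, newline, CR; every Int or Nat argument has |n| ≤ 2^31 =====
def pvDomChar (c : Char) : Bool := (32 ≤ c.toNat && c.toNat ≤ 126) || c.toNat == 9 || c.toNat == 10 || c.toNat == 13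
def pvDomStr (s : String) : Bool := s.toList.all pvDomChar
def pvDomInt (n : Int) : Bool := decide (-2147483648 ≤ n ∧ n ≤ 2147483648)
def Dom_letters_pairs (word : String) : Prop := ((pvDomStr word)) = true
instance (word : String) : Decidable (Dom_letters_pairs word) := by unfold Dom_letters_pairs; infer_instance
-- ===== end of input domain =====

-- B replaces A's nested quadratic scan over index pairs by a single pass keeping the
-- earliest index of each two-char substring in a dict (gap ≥ 2 check).

-- ===== PORT A =====
def letters_pairs (word : String) : Bool :=
  let substrings :=
    (PySem.List.pyRange 0 (PySem.Str.len word - 1) 1).foldl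
      (fun acc i => acc ++ [PySem.Str.slice word (some i) (some (i + 2))]) []
  (PySem.List.pyRange 0 ((substrings.length : Int) - 2) 1).any (fun i =>
    (PySem.List.pyRange (i + 2) ((substrings.length : Int)) 1).any (fun j =>
      PySem.List.pyGetD substrings i "" == PySem.List.pyGetD substrings j ""))

-- ===== PORT B =====
-- the loop 'for i in range(len(word)-1): …' with early return, over the dict 'first'
def lpLoop (word : String) (idxs : List Int) (first : PySem.Dict String Int) : Bool :=
  match idxs with
  | [] => false
  | i :: rest =>
    let pair := PySem.Str.slice word (some i) (some (i + 2))
    match first.get? pair with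
    | some e => if 2 ≤ i - e then true else lpLoop word rest first
    | none => lpLoop word rest (first.insert pair i)

def letters_pairs_alt (word : String) : Bool :=
  lpLoop word (PySem.List.pyRange 0 (PySem.Str.len word - 1) 1) PySem.Dict.empty

-- ===== PRECONDITION & SPEC =====
def Spec_letters_pairs (word : String) (out : Bool) : Prop := out = letters_pairs_alt word
instance (word : String) (out : Bool) : Decidable (Spec_letters_pairs word out) := by unfold Spec_letters_pairs; infer_instance

-- ===== CLAIM (what is proved, stated in full; the proofs are below) =====
def Claim_equal_letters_pairs : Prop := ∀ (word : String), Dom_letters_pairs word → Spec_letters_pairs word (letters_pairs word)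

-- ===== LEMMAS AND PROOFS =====

-- the two-char substring starting at index i (the value both ports compare)
def lpF (word : String) (i : Int) : String := PySem.Str.slice word (some i) (some (i + 2))

-- 'equal pairs at indices i, j with k ≤ j < m and gap ≥ 2'
def lpHas (word : String) (k m : Int) : Prop :=
  ∃ i j : Int, 0 ≤ i ∧ i + 2 ≤ j ∧ k ≤ j ∧ j < m ∧ lpF word i = lpF word j

-- dict invariant of B's pass: 'first' maps p exactly to the earliest index < k where p occurs
def lpInv (word : String) (d : PySem.Dict String Int) (k : Int) : Prop :=
  ∀ p e, d.get? p = some e ↔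
    (0 ≤ e ∧ e < k ∧ lpF word e = p ∧ ∀ i, 0 ≤ i → i < e → lpF word i ≠ p)

lemma lp_exists_min (word : String) (p : String) (k : Int)
    (h : ∃ i : Int, 0 ≤ i ∧ i < k ∧ lpF word i = p) :
    ∃ e : Int, 0 ≤ e ∧ e < k ∧ lpF word e = p ∧ ∀ i, 0 ≤ i → i < e → lpF word i ≠ p := by
  obtain ⟨i0, hi0, hik, hf⟩ := h
  have hP : ∃ t : Nat, lpF word (t : Int) = p :=
    ⟨i0.toNat, by rwa [Int.toNat_of_nonneg hi0]⟩
  refine ⟨(Nat.find hP : Int), by positivity, ?_, Nat.find_spec hP, ?_⟩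
  · have hle : Nat.find hP ≤ i0.toNat :=
      Nat.find_le (by rwa [Int.toNat_of_nonneg hi0])
    omega
  · intro i h0 hlt hfi
    have : i.toNat < Nat.find hP := by omega
    exact Nat.find_min hP this (by rwa [Int.toNat_of_nonneg h0])

-- if no earlier pair at gap ≥ 2 equals the pair at k, step the lower bound
lemma lpHas_succ (word : String) (k m : Int)
    (hno : ∀ i, 0 ≤ i → i + 2 ≤ k → lpF word i ≠ lpF word k) :
    lpHas word (k + 1) m ↔ lpHas word k m := by
  constructor
  · rintro ⟨i, j, h1, h2, h3, h4, h5⟩; exact ⟨i, j, h1, h2, by omega, h4, h5⟩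
  · rintro ⟨i, j, h1, h2, h3, h4, h5⟩
    rcases eq_or_lt_of_le h3 with hjk | hjk
    · exact absurd h5 (hno i h1 (by omega) ∘ (hjk ▸ ·))
    · exact ⟨i, j, h1, h2, by omega, h4, h5⟩

lemma lpInv_succ_mem (word : String) (d : PySem.Dict String Int) (k e0 : Int)
    (hinv : lpInv word d k) (hk : d.get? (lpF word k) = some e0) :
    lpInv word d (k + 1) := by
  intro p e
  rw [hinv p e]
  constructor
  · rintro ⟨a, b, c, dd⟩; exact ⟨a, by omega, c, dd⟩
  · rintro ⟨h0, h1, h2, h3⟩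
    rcases Int.lt_or_le e k with h | h
    · exact ⟨h0, h, h2, h3⟩
    · -- e = k : contradicts minimality, since lpF word k = p already occurs at e0 < k
      have he : e = k := by omega
      obtain ⟨g0, g1, g2, _⟩ := (hinv _ e0).mp hk
      exact absurd (g2.trans (he ▸ h2)) (h3 e0 g0 (by omega))

lemma lpInv_succ_insert (word : String) (d : PySem.Dict String Int) (k : Int) (hk : 0 ≤ k)
    (hinv : lpInv word d k)
    (hnone : ∀ i, 0 ≤ i → i < k → lpF word i ≠ lpF word k) :
    lpInv word (d.insert (lpF word k) k) (k + 1) := by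
  intro p e
  rw [PySem.Dict.get?_insert]
  split_ifs with hp
  · subst hp
    constructor
    · rintro ⟨rfl⟩
      exact ⟨hk, by omega, rfl, hnone⟩
    · rintro ⟨h0, h1, h2, h3⟩
      rcases Int.lt_or_le e k with h | h
      · exact absurd h2 (hnone e h0 h)
      · have : e = k := by omega
        simp [this]
  · rw [hinv p e]
    constructor
    · rintro ⟨a, b, c, dd⟩; exact ⟨a, by omega, c, dd⟩
    · rintro ⟨h0, h1, h2, h3⟩
      rcases Int.lt_or_le e k with h | h
      · exact ⟨h0, h, h2, h3⟩
      · have : e = k := by omega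
        exact absurd (this ▸ h2).symm hp

lemma lpLoop_iff (word : String) (m : Int) :
    ∀ (t : Nat) (k : Int) (d : PySem.Dict String Int),
      (m - k).toNat = t → 0 ≤ k → lpInv word d k →
      (lpLoop word (PySem.List.pyRange k m 1) d = true ↔ lpHas word k m) := by
  intro t
  induction t with
  | zero =>
    intro k d ht hk hinv
    rw [PySem.List.pyRange_one_eq_nil (by omega)]
    simp only [lpLoop]
    constructor
    · intro h; cases h
    · rintro ⟨i, j, _, _, h3, h4, _⟩; omega
  | succ t ih =>
    intro k d ht hk hinv
    have hkm : k < m := by omega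
    rw [PySem.List.pyRange_one_cons hkm]
    show (match d.get? (lpF word k) with
      | some e => if 2 ≤ k - e then true else lpLoop word (PySem.List.pyRange (k+1) m 1) d
      | none => lpLoop word (PySem.List.pyRange (k+1) m 1) (d.insert (lpF word k) k)) = true
      ↔ lpHas word k m
    cases hq : d.get? (lpF word k) with
    | some e =>
      obtain ⟨he0, hek, hfe, hmin⟩ := (hinv _ e).mp hq
      by_cases hgap : 2 ≤ k - e
      · simp only [if_pos hgap]
        exact iff_of_true trivial ⟨e, k, he0, by omega, le_refl k, hkm, hfe⟩
      · simp only [if_neg hgap]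
        rw [ih (k + 1) d (by omega) (by omega) (lpInv_succ_mem word d k e hinv hq)]
        refine lpHas_succ word k m ?_
        intro i h0 h2 hfi
        -- the first occurrence e of lpF word k satisfies e ≤ i, so the gap would be ≥ 2
        have : ¬ i < e := fun hlt => hmin i h0 hlt hfi
        omega
    | none =>
      have hnone : ∀ i, 0 ≤ i → i < k → lpF word i ≠ lpF word k := by
        intro i h0 hik hfi
        obtain ⟨e, g0, g1, g2, g3⟩ := lp_exists_min word (lpF word k) k ⟨i, h0, hik, hfi⟩
        rw [(hinv _ e).mpr ⟨g0, g1, g2, g3⟩] at hq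
        cases hq
      rw [ih (k + 1) (d.insert (lpF word k) k) (by omega) (by omega)
        (lpInv_succ_insert word d k hk hinv hnone)]
      refine lpHas_succ word k m ?_
      intro i h0 h2
      exact hnone i h0 (by omega)

lemma portB_iff (word : String) :
    letters_pairs_alt word = true ↔ lpHas word 0 (PySem.Str.len word - 1) := by
  unfold letters_pairs_alt
  refine lpLoop_iff word _ _ 0 PySem.Dict.empty rfl (le_refl 0) ?_
  intro p e
  simp [PySem.Dict.get?_empty]
  omega

lemma portA_iff (word : String) :
    letters_pairs word = true ↔ lpHas word 0 (PySem.Str.len word - 1) := by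
  unfold letters_pairs
  rw [PySem.List.foldl_append_singleton_eq_map, List.nil_append]
  set m := PySem.Str.len word - 1 with hm
  have hlen : ((((PySem.List.pyRange 0 m 1).map
      (fun i => PySem.Str.slice word (some i) (some (i + 2)))).length : Int)) = (m.toNat : Int) := by
    simp [PySem.List.length_pyRange_one]
  simp only [hlen]
  rcases Int.lt_or_le m 0 with hm0 | hm0
  · constructor
    · intro h
      rw [PySem.List.pyRange_one_eq_nil (by omega)] at h
      cases h
    · rintro ⟨i, j, h1, h2, _, h4, _⟩; omega
  · rw [Int.toNat_of_nonneg hm0]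
    simp only [List.any_eq_true, PySem.List.mem_pyRange_one, beq_iff_eq]
    constructor
    · rintro ⟨i, ⟨hi0, hi⟩, j, ⟨hj1, hj2⟩, heq⟩
      rw [PySem.List.pyGetD_map_pyRange_of_nonneg _ m i _ hi0 (by omega),
          PySem.List.pyGetD_map_pyRange_of_nonneg _ m j _ (by omega) hj2] at heq
      exact ⟨i, j, hi0, hj1, by omega, hj2, heq⟩
    · rintro ⟨i, j, h1, h2, _, h4, h5⟩
      refine ⟨i, ⟨h1, by omega⟩, j, ⟨h2, h4⟩, ?_⟩
      rw [PySem.List.pyGetD_map_pyRange_of_nonneg _ m i _ h1 (by omega),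
          PySem.List.pyGetD_map_pyRange_of_nonneg _ m j _ (by omega) h4]
      exact h5

-- ===== VERDICT (by name: the statement is the Claim_ definition above) =====
theorem letters_pairs_spec : Claim_equal_letters_pairs := by
  intro word _
  unfold Spec_letters_pairs
  rw [Bool.eq_iff_iff, portA_iff, portB_iff]
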